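-- pv_equiv track=rewrite | github.com/MasterALiReza/Call-Of-Duty-Attachments | handlers/inline/inline_handler.py | _select_top_weapons
-- ===== SOURCE A (Python) =====
-- def _select_top_weapons(q: str, items, max_weapons: int=2):
--     if not items:
--         return []
--     ql = (q or '').lower()
--     uniques = []
--     for it in items:
--         category = None
--         weapon = None
--         try:
--             category = it.get('category')
--             weapon = it.get('weapon')
--         except Exception:
--             pass
--         if not category or not weapon:
--             continue
--         key = (category, weapon)
--         if key not in uniques and category and weapon:
--             uniques.append(key)
--
--     def rank(pair):
--         w = (pair[1] or '').lower()
--         if w == ql: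
--             return 100
--         if w.startswith(ql) and ql:
--             return 60
--         if ql in w and ql:
--             return 30
--         return 0
--     ranked = sorted(uniques, key=rank, reverse=True)
--     return ranked[:max_weapons]
-- ===== SOURCE B (Python) =====
-- def _select_top_weapons(q: str, items, max_weapons: int=2):
--     if not items:
--         return []
--     ql = (q or '').lower()
--     seen = set()
--     uniques = []
--     for it in items:
--         category = it.get('category')
--         weapon = it.get('weapon')
--         if not category or not weapon:
--             continue
--         key = (category, weapon)
--         if key not in seen:
--             seen.add(key)
--             uniques.append(key)
--     exact, prefix, sub, rest = [], [], [], []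
--     for pair in uniques:
--         w = (pair[1] or '').lower()
--         if w == ql:
--             exact.append(pair)
--         elif ql and w.startswith(ql):
--             prefix.append(pair)
--         elif ql and ql in w:
--             sub.append(pair)
--         else:
--             rest.append(pair)
--     return (exact + prefix + sub + rest)[:max_weapons]
-- ===== Notes on version B (the rewrite author's own statement) =====
-- stated objective: alternative
-- what changed: B dedups with a seen-set instead of A's 'key not in uniques' list scan, and replaces A's stable reverse sort + slice by a single bucket pass that appends each unique pair to one of four score-tier lists (100/60/30/0) concatenated in descending order, preserving the stable sort's within-tier order.
import Mathlib
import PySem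

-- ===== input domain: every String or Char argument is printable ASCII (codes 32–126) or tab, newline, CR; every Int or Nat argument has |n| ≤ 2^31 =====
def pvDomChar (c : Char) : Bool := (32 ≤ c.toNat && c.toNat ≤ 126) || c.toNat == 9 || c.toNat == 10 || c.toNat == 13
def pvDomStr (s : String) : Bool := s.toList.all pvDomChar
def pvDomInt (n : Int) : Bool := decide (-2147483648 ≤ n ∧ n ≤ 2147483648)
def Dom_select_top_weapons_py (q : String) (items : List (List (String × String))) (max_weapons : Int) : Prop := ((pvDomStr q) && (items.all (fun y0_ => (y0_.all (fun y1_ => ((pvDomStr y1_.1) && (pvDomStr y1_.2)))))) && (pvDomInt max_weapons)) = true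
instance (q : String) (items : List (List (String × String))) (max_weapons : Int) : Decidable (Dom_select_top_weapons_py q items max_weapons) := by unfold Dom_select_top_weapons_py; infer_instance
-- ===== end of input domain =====

-- B replaces A's list-membership dedup by a seen-set and its sort+slice by a single
-- bucket pass into four score tiers concatenated in descending order (objective: alternative).


-- ===== PORT A =====
-- rank(pair) from A: '(pair[1] or "").lower()' is lower(pair.2) for a str argument
def pyRank (ql : String) (pair : String × String) : Int :=
  let w := PySem.Str.lower pair.2
  if w == ql then 100
  else if PySem.Str.startswith w ql && !(ql == "") then 60
  else if PySem.Str.isIn ql w && !(ql == "") then 30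
  else 0

def select_top_weapons_py (q : String) (items : List (List (String × String))) (max_weapons : Int) : List (String × String) :=
  if items = [] then []
  else
    let ql := PySem.Str.lower q
    let uniques := items.foldl (fun uniques it =>
      match (PySem.Dict.mk it).get? "category", (PySem.Dict.mk it).get? "weapon" with
      | some c, some w =>
          if c = "" ∨ w = "" then uniques      -- 'if not category or not weapon: continue'
          else if (c, w) ∉ uniques ∧ c ≠ "" ∧ w ≠ "" then uniques ++ [(c, w)]
          else uniques
      | _, _ => uniques) []
    let ranked := PySem.List.sorted uniques (pyRank ql) true
    PySem.List.slice ranked none (some max_weapons)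

-- ===== PORT B =====
def altRank (ql : String) (pair : String × String) : Int :=
  let w := PySem.Str.lower pair.2
  if w == ql then 100
  else if !(ql == "") && PySem.Str.startswith w ql then 60
  else if !(ql == "") && PySem.Str.isIn ql w then 30
  else 0

def select_top_weapons_py_alt (q : String) (items : List (List (String × String))) (max_weapons : Int) : List (String × String) :=
  if items = [] then []
  else
    let ql := PySem.Str.lower q
    let st := items.foldl (fun (st : PySem.Set (String × String) × List (String × String)) it =>
      match (PySem.Dict.mk it).get? "category" with
      | none => st
      | some c =>
        match (PySem.Dict.mk it).get? "weapon" with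
        | none => st
        | some w =>
          if c = "" ∨ w = "" then st
          else if PySem.Set.contains st.1 (c, w) then st
          else (PySem.Set.add st.1 (c, w), st.2 ++ [(c, w)])) (PySem.Set.empty, [])
    let t := st.2.foldl (fun (t : List (String × String) × List (String × String) × List (String × String) × List (String × String)) p =>
      let s := altRank ql p
      if s = 100 then (t.1 ++ [p], t.2.1, t.2.2.1, t.2.2.2)
      else if s = 60 then (t.1, t.2.1 ++ [p], t.2.2.1, t.2.2.2)
      else if s = 30 then (t.1, t.2.1, t.2.2.1 ++ [p], t.2.2.2)
      else (t.1, t.2.1, t.2.2.1, t.2.2.2 ++ [p])) ([], [], [], [])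
    PySem.List.slice (t.1 ++ t.2.1 ++ t.2.2.1 ++ t.2.2.2) none (some max_weapons)

-- ===== PRECONDITION & SPEC =====
def Spec_select_top_weapons_py (q : String) (items : List (List (String × String))) (max_weapons : Int) (out : List (String × String)) : Prop := out = select_top_weapons_py_alt q items max_weapons
instance (q : String) (items : List (List (String × String))) (max_weapons : Int) (out : List (String × String)) : Decidable (Spec_select_top_weapons_py q items max_weapons out) := by unfold Spec_select_top_weapons_py; infer_instance

-- ===== CLAIM (what is proved, stated in full; the proofs are below) =====
def Claim_equal_select_top_weapons_py : Prop := ∀ (q : String) (items : List (List (String × String))) (max_weapons : Int), Dom_select_top_weapons_py q items max_weapons → Spec_select_top_weapons_py q items max_weapons (select_top_weapons_py q items max_weapons)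

-- ===== LEMMAS AND PROOFS =====

theorem rank_eq (ql : String) (p : String × String) : pyRank ql p = altRank ql p := by
  simp only [pyRank, altRank, Bool.and_comm]

-- each rank value is one of the four tiers
theorem rank_cases (ql : String) (p : String × String) :
    altRank ql p = 100 ∨ altRank ql p = 60 ∨ altRank ql p = 30 ∨ altRank ql p = 0 := by
  unfold altRank; dsimp only; split_ifs <;> simp

-- B's dedup loop with seen = uniques equals A's dedup loop
theorem dedup_eq (l : List (List (String × String))) : ∀ (u : List (String × String)),
    l.foldl (fun (st : PySem.Set (String × String) × List (String × String)) it =>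
      match (PySem.Dict.mk it).get? "category" with
      | none => st
      | some c =>
        match (PySem.Dict.mk it).get? "weapon" with
        | none => st
        | some w =>
          if c = "" ∨ w = "" then st
          else if PySem.Set.contains st.1 (c, w) then st
          else (PySem.Set.add st.1 (c, w), st.2 ++ [(c, w)])) (u, u)
    = (l.foldl (fun uniques it =>
      match (PySem.Dict.mk it).get? "category", (PySem.Dict.mk it).get? "weapon" with
      | some c, some w =>
          if c = "" ∨ w = "" then uniques
          else if (c, w) ∉ uniques ∧ c ≠ "" ∧ w ≠ "" then uniques ++ [(c, w)]
          else uniques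
      | _, _ => uniques) u,
      l.foldl (fun uniques it =>
      match (PySem.Dict.mk it).get? "category", (PySem.Dict.mk it).get? "weapon" with
      | some c, some w =>
          if c = "" ∨ w = "" then uniques
          else if (c, w) ∉ uniques ∧ c ≠ "" ∧ w ≠ "" then uniques ++ [(c, w)]
          else uniques
      | _, _ => uniques) u) := by
  induction l with
  | nil => intro u; rfl
  | cons it l ih =>
      intro u
      simp only [List.foldl_cons]
      rcases hc : (PySem.Dict.mk it).get? "category" with _ | c
      · exact ih u
      rcases hw : (PySem.Dict.mk it).get? "weapon" with _ | w
      · exact ih u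
      by_cases hcw : c = "" ∨ w = ""
      · simp only [if_pos hcw]; exact ih u
      rw [not_or] at hcw
      simp only [if_neg (by tauto : ¬ (c = "" ∨ w = ""))]
      by_cases hm : (c, w) ∈ u
      · have : PySem.Set.contains u (c, w) = true := (PySem.Set.contains_iff u (c,w)).mpr hm
        simp only [this, if_true, if_neg (by tauto : ¬ ((c, w) ∉ u ∧ c ≠ "" ∧ w ≠ ""))]
        exact ih u
      · have hct : PySem.Set.contains u (c, w) = false := by
          rw [← Bool.not_eq_true]; simp [hm]
        have hadd : PySem.Set.add u (c, w) = u ++ [(c, w)] := by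
          simp [PySem.Set.add, hm]
        simp only [hct, hadd, if_pos (⟨hm, hcw.1, hcw.2⟩ : (c, w) ∉ u ∧ c ≠ "" ∧ w ≠ "")]
        exact ih (u ++ [(c, w)])

theorem insertBy_append_not {α : Type} (before : α → α → Bool) (x : α) (a r : List α)
    (h : ∀ y ∈ a, before x y = false) :
    PySem.List.insertBy before x (a ++ r) = a ++ PySem.List.insertBy before x r := by
  induction a with
  | nil => rfl
  | cons z a ih =>
      have hz : before x z = false := h z (by simp)
      simp [PySem.List.insertBy, hz, ih (fun y hy => h y (by simp [hy]))]

theorem insertBy_all {α : Type} (before : α → α → Bool) (x : α) (l : List α)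
    (h : ∀ y ∈ l, before x y = true) :
    PySem.List.insertBy before x l = x :: l := by
  cases l with
  | nil => rfl
  | cons z l => simp [PySem.List.insertBy, h z (by simp)]

-- the reverse stable sort under a 4-valued key is the four tier filters concatenated
theorem sorted_rank_eq_tiers {α : Type} (rk : α → Int)
    (hv : ∀ x : α, rk x = 100 ∨ rk x = 60 ∨ rk x = 30 ∨ rk x = 0) (l : List α) :
    PySem.List.sorted l rk true =
      l.filter (fun p => rk p == 100) ++ l.filter (fun p => rk p == 60) ++
      l.filter (fun p => rk p == 30) ++ l.filter (fun p => rk p == 0) := by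
  rw [PySem.List.sorted_rev_eq_foldl_insertBy]
  induction l using List.reverseRecOn with
  | nil => simp
  | append_singleton ys x ih =>
      rw [List.foldl_append, List.foldl_cons, List.foldl_nil, ih]
      have hmem : ∀ (v : Int) (y : α), y ∈ ys.filter (fun p => rk p == v) → rk y = v := by
        intro v y hy
        simpa using (List.mem_filter.mp hy).2
      rcases hv x with hx | hx | hx | hx
      · rw [show ys.filter (fun p => rk p == 100) ++ ys.filter (fun p => rk p == 60) ++
              ys.filter (fun p => rk p == 30) ++ ys.filter (fun p => rk p == 0)
            = ys.filter (fun p => rk p == 100) ++ (ys.filter (fun p => rk p == 60) ++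
              (ys.filter (fun p => rk p == 30) ++ ys.filter (fun p => rk p == 0))) by simp,
            insertBy_append_not _ _ _ _ (fun y hy => by simp [hmem 100 y hy, hx]),
            insertBy_all _ _ _ (fun y hy => by
              have : rk y = 60 ∨ rk y = 30 ∨ rk y = 0 := by
                rcases List.mem_append.mp hy with h | h
                · exact Or.inl (hmem 60 y h)
                · rcases List.mem_append.mp h with h' | h'
                  · exact Or.inr (Or.inl (hmem 30 y h'))
                  · exact Or.inr (Or.inr (hmem 0 y h'))
              simp only [decide_eq_true_iff, hx]
              omega)]
        simp [List.filter_append, hx]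
      · rw [show ys.filter (fun p => rk p == 100) ++ ys.filter (fun p => rk p == 60) ++
              ys.filter (fun p => rk p == 30) ++ ys.filter (fun p => rk p == 0)
            = (ys.filter (fun p => rk p == 100) ++ ys.filter (fun p => rk p == 60)) ++
              (ys.filter (fun p => rk p == 30) ++ ys.filter (fun p => rk p == 0)) by simp,
            insertBy_append_not _ _ _ _ (fun y hy => by
              have : rk y = 100 ∨ rk y = 60 := by
                rcases List.mem_append.mp hy with h | h
                · exact Or.inl (hmem 100 y h)
                · exact Or.inr (hmem 60 y h)
              simp only [decide_eq_false_iff_not, hx]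
              omega),
            insertBy_all _ _ _ (fun y hy => by
              have : rk y = 30 ∨ rk y = 0 := by
                rcases List.mem_append.mp hy with h | h
                · exact Or.inl (hmem 30 y h)
                · exact Or.inr (hmem 0 y h)
              simp only [decide_eq_true_iff, hx]
              omega)]
        simp [List.filter_append, hx]
      · rw [show ys.filter (fun p => rk p == 100) ++ ys.filter (fun p => rk p == 60) ++
              ys.filter (fun p => rk p == 30) ++ ys.filter (fun p => rk p == 0)
            = (ys.filter (fun p => rk p == 100) ++ ys.filter (fun p => rk p == 60) ++
               ys.filter (fun p => rk p == 30)) ++ ys.filter (fun p => rk p == 0) by simp,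
            insertBy_append_not _ _ _ _ (fun y hy => by
              have : rk y = 100 ∨ rk y = 60 ∨ rk y = 30 := by
                rcases List.mem_append.mp hy with h | h
                · rcases List.mem_append.mp h with h' | h'
                  · exact Or.inl (hmem 100 y h')
                  · exact Or.inr (Or.inl (hmem 60 y h'))
                · exact Or.inr (Or.inr (hmem 30 y h))
              simp only [decide_eq_false_iff_not, hx]
              omega),
            insertBy_all _ _ _ (fun y hy => by
              have : rk y = 0 := hmem 0 y hy
              simp only [decide_eq_true_iff, hx]
              omega)]
        simp [List.filter_append, hx]
      · rw [show ys.filter (fun p => rk p == 100) ++ ys.filter (fun p => rk p == 60) ++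
              ys.filter (fun p => rk p == 30) ++ ys.filter (fun p => rk p == 0)
            = (ys.filter (fun p => rk p == 100) ++ ys.filter (fun p => rk p == 60) ++
               ys.filter (fun p => rk p == 30) ++ ys.filter (fun p => rk p == 0)) ++ [] by simp,
            insertBy_append_not _ _ _ _ (fun y hy => by
              have : rk y = 100 ∨ rk y = 60 ∨ rk y = 30 ∨ rk y = 0 := hv y
              simp only [decide_eq_false_iff_not, hx]
              omega)]
        simp [PySem.List.insertBy, List.filter_append, hx]

-- the bucket loop computes the four tier filters
theorem tiers_foldl_gen (ql : String) (l : List (String × String)) :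
    ∀ a b c d : List (String × String),
    l.foldl (fun (t : List (String × String) × List (String × String) × List (String × String) × List (String × String)) p =>
      let s := altRank ql p
      if s = 100 then (t.1 ++ [p], t.2.1, t.2.2.1, t.2.2.2)
      else if s = 60 then (t.1, t.2.1 ++ [p], t.2.2.1, t.2.2.2)
      else if s = 30 then (t.1, t.2.1, t.2.2.1 ++ [p], t.2.2.2)
      else (t.1, t.2.1, t.2.2.1, t.2.2.2 ++ [p])) (a, b, c, d)
    = (a ++ l.filter (fun p => altRank ql p == 100), b ++ l.filter (fun p => altRank ql p == 60),
       c ++ l.filter (fun p => altRank ql p == 30), d ++ l.filter (fun p => altRank ql p == 0)) := by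
  induction l with
  | nil => intro a b c d; simp
  | cons p l ih =>
      intro a b c d
      simp only [List.foldl_cons]
      rcases rank_cases ql p with h | h | h | h
      · simp only [h, ih, List.filter_cons]
        norm_num
      · simp only [h, if_neg (by omega : ¬ (60:Int) = 100), ih, List.filter_cons]
        norm_num
      · simp only [h, if_neg (by omega : ¬ (30:Int) = 100), if_neg (by omega : ¬ (30:Int) = 60), ih, List.filter_cons]
        norm_num
      · simp only [h, if_neg (by omega : ¬ (0:Int) = 100), if_neg (by omega : ¬ (0:Int) = 60), if_neg (by omega : ¬ (0:Int) = 30), ih, List.filter_cons]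
        norm_num

-- ===== VERDICT (by name: the statement is the Claim_ definition above) =====
theorem select_top_weapons_py_spec : Claim_equal_select_top_weapons_py := by
  intro q items max_weapons _
  unfold Spec_select_top_weapons_py select_top_weapons_py select_top_weapons_py_alt
  by_cases h : items = []
  · simp [h]
  · simp only [if_neg h, PySem.Set.empty]
    rw [dedup_eq items [], tiers_foldl_gen]
    rw [funext (rank_eq (PySem.Str.lower q)), sorted_rank_eq_tiers _ (rank_cases (PySem.Str.lower q))]
    simp
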